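-- pv_equiv track=rewrite | github.com/alantao5056/USACO | contests/2018_december_bronze/back_and_forth/back_forth.py | getLenOfPossibleResults
-- ===== SOURCE A (Python) =====
-- def getLenOfPossibleResults(lTankBuckets: list, rTankBuckets: list) -> int:
--   lTank = 1000
--   rTank = 1000
--   combSet = set()
--
--   for i in lTankBuckets:
--     lTank1 = lTank + i
--     rTank1 = rTank - i
--     lTankBuckets1 = removeBucket(lTankBuckets, i)
--     rTankBuckets1 = addBucket(rTankBuckets, i)
--     for j in rTankBuckets1:
--       lTank2 = lTank1 - j
--       rTank2 = rTank1 + j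
--       lTankBuckets2 = addBucket(lTankBuckets1, j)
--       rTankBuckets2 = removeBucket(rTankBuckets1, j)
--       for k in lTankBuckets2:
--         lTank3 = lTank2 + k
--         rTank3 = rTank2 - k
--         lTankBuckets3 = removeBucket(lTankBuckets2, k)
--         rTankBuckets3 = addBucket(rTankBuckets2, k)
--         for l in rTankBuckets3:
--           lTank4 = lTank3 - l
--           combSet.add(lTank4)
--   return len(combSet)
--
-- def removeBucket(originalBuckets, bucket):
--   newBuckets = originalBuckets.copy()
--   newBuckets.pop(originalBuckets.index(bucket))
--   return newBuckets
--
-- def addBucket(originalBuckets, bucket):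
--   newBuckets = originalBuckets.copy()
--   newBuckets.append(bucket)
--   return newBuckets
-- ===== SOURCE B (Python) =====
-- def getLenOfPossibleResults(lTankBuckets: list, rTankBuckets: list) -> int:
--   # Index-based enumeration over "virtual" bucket pools: instead of copying and
--   # re-indexing lists at every depth, each pool is addressed by position, with the
--   # moved bucket appended virtually and the removed one skipped by index.
--   nL = len(lTankBuckets)
--   nR = len(rTankBuckets)
--   results = set()
--   for i1 in range(nL):
--     i = lTankBuckets[i1]
--     for j1 in range(nR + 1):
--       j = rTankBuckets[j1] if j1 < nR else i
--       base = 1000 + i - j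
--       for k1 in range(nL + 1):
--         if k1 == i1:
--           continue
--         k = lTankBuckets[k1] if k1 < nL else j
--         for l1 in range(nR + 2):
--           if l1 == j1:
--             continue
--           l = rTankBuckets[l1] if l1 < nR else (i if l1 == nR else k)
--           results.add(base + k - l)
--   return len(results)
-- ===== Notes on version B (the rewrite author's own statement) =====
-- stated objective: alternative
-- what changed: Replaces A's per-step list surgery (removeBucket/addBucket copying and .index-scanning new bucket lists at every recursion depth) by pure index arithmetic over virtual pools: a moved bucket is addressed as a sentinel index past the end and a removed bucket is skipped by position, so no intermediate lists are built at all.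
import Mathlib
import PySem

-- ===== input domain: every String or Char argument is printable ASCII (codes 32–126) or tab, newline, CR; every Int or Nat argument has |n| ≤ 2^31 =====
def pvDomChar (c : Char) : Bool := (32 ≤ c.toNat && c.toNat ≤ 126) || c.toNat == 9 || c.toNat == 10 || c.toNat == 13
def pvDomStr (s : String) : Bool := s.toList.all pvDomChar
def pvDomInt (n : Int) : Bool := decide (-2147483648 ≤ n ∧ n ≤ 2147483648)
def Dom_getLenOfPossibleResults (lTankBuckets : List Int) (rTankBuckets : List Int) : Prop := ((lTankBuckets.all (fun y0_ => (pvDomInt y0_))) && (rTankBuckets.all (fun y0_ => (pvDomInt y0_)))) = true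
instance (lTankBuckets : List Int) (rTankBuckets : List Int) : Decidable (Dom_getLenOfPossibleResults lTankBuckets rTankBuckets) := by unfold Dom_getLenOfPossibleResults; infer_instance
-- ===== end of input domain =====

-- B replaces A's per-depth list copying (removeBucket/addBucket building fresh lists) by pure
-- index arithmetic over virtual pools (moved bucket = sentinel index, removed bucket = skipped
-- index); objective: alternative (same asymptotic cost, allocation-free; not measured faster).

-- ===== PORT A =====
-- removeBucket: copy, then pop at originalBuckets.index(bucket); at every call site in A the
-- bucket is a member of the list, so the `none` fallbacks (Python would raise) are unreachable.
def pvRemoveBucket (originalBuckets : List Int) (bucket : Int) : List Int :=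
  match PySem.List.index? originalBuckets bucket with
  | some n =>
    match PySem.List.pop? originalBuckets (n : Int) with
    | some r => r.2
    | none => originalBuckets  -- unreachable: index? returns an in-range index
  | none => originalBuckets    -- unreachable: bucket ∈ originalBuckets at every call site

def pvAddBucket (originalBuckets : List Int) (bucket : Int) : List Int :=
  originalBuckets ++ [bucket]

def getLenOfPossibleResults (lTankBuckets : List Int) (rTankBuckets : List Int) : Int :=
  let lTank : Int := 1000
  let rTank : Int := 1000
  let combSet : PySem.Set Int := PySem.Set.empty
  let combSet := lTankBuckets.foldl (fun s i =>
    let lTank1 := lTank + i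
    let rTank1 := rTank - i
    let lTankBuckets1 := pvRemoveBucket lTankBuckets i
    let rTankBuckets1 := pvAddBucket rTankBuckets i
    rTankBuckets1.foldl (fun s j =>
      let lTank2 := lTank1 - j
      let rTank2 := rTank1 + j
      let lTankBuckets2 := pvAddBucket lTankBuckets1 j
      let rTankBuckets2 := pvRemoveBucket rTankBuckets1 j
      lTankBuckets2.foldl (fun s k =>
        let lTank3 := lTank2 + k
        let _rTank3 := rTank2 - k
        let _lTankBuckets3 := pvRemoveBucket lTankBuckets2 k
        let rTankBuckets3 := pvAddBucket rTankBuckets2 k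
        rTankBuckets3.foldl (fun s l =>
          let lTank4 := lTank3 - l
          PySem.Set.add s lTank4) s) s) s) combSet
  PySem.Set.len combSet

-- ===== PORT B =====
def getLenOfPossibleResults_alt (lTankBuckets : List Int) (rTankBuckets : List Int) : Int :=
  let nL : Int := lTankBuckets.length
  let nR : Int := rTankBuckets.length
  let results : PySem.Set Int := PySem.Set.empty
  let results := (PySem.List.pyRange 0 nL 1).foldl (fun s i1 =>
    let i := PySem.List.pyGetD lTankBuckets i1 0
    (PySem.List.pyRange 0 (nR + 1) 1).foldl (fun s j1 =>
      let j := if j1 < nR then PySem.List.pyGetD rTankBuckets j1 0 else i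
      let base := 1000 + i - j
      (PySem.List.pyRange 0 (nL + 1) 1).foldl (fun s k1 =>
        if k1 = i1 then s else
        let k := if k1 < nL then PySem.List.pyGetD lTankBuckets k1 0 else j
        (PySem.List.pyRange 0 (nR + 2) 1).foldl (fun s l1 =>
          if l1 = j1 then s else
          let l := if l1 < nR then PySem.List.pyGetD rTankBuckets l1 0
                   else if l1 = nR then i else k
          PySem.Set.add s (base + k - l)) s) s) s) results
  PySem.Set.len results

-- ===== PRECONDITION & SPEC =====
def Spec_getLenOfPossibleResults (lTankBuckets : List Int) (rTankBuckets : List Int) (out : Int) : Prop := out = getLenOfPossibleResults_alt lTankBuckets rTankBuckets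
instance (lTankBuckets : List Int) (rTankBuckets : List Int) (out : Int) : Decidable (Spec_getLenOfPossibleResults lTankBuckets rTankBuckets out) := by unfold Spec_getLenOfPossibleResults; infer_instance

-- ===== CLAIM (what is proved, stated in full; the proofs are below) =====
def Claim_equal_getLenOfPossibleResults : Prop := ∀ (lTankBuckets : List Int) (rTankBuckets : List Int), Dom_getLenOfPossibleResults lTankBuckets rTankBuckets → Spec_getLenOfPossibleResults lTankBuckets rTankBuckets (getLenOfPossibleResults lTankBuckets rTankBuckets)

-- ===== LEMMAS AND PROOFS =====

-- A's set, with the let-bindings of the port inlined (definitionally equal to the port's fold)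
def pvASet (L R : List Int) : PySem.Set Int :=
  L.foldl (fun s i =>
    (pvAddBucket R i).foldl (fun s j =>
      (pvAddBucket (pvRemoveBucket L i) j).foldl (fun s k =>
        (pvAddBucket (pvRemoveBucket (pvAddBucket R i) j) k).foldl (fun s l =>
          PySem.Set.add s (1000 + i - j + k - l)) s) s) s) PySem.Set.empty

def pvE (L R : List Int) (i1 j1 k1 l1 : Int) : Int :=
  1000 + PySem.List.pyGetD L i1 0 -
    (if j1 < (R.length : Int) then PySem.List.pyGetD R j1 0 else PySem.List.pyGetD L i1 0) +
    (if k1 < (L.length : Int) then PySem.List.pyGetD L k1 0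
     else if j1 < (R.length : Int) then PySem.List.pyGetD R j1 0 else PySem.List.pyGetD L i1 0) -
    (if l1 < (R.length : Int) then PySem.List.pyGetD R l1 0
     else if l1 = (R.length : Int) then PySem.List.pyGetD L i1 0
     else if k1 < (L.length : Int) then PySem.List.pyGetD L k1 0
     else if j1 < (R.length : Int) then PySem.List.pyGetD R j1 0 else PySem.List.pyGetD L i1 0)

-- B's set, with the let-bindings of the port inlined (definitionally equal to the port's fold);
-- pvE is the inlined innermost expression
def pvBSet (L R : List Int) : PySem.Set Int :=
  (PySem.List.pyRange 0 (L.length : Int) 1).foldl (fun s i1 =>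
    (PySem.List.pyRange 0 ((R.length : Int) + 1) 1).foldl (fun s j1 =>
      (PySem.List.pyRange 0 ((L.length : Int) + 1) 1).foldl (fun s k1 =>
        if k1 = i1 then s else
        (PySem.List.pyRange 0 ((R.length : Int) + 2) 1).foldl (fun s l1 =>
          if l1 = j1 then s else
          PySem.Set.add s (pvE L R i1 j1 k1 l1)) s) s) s)
    PySem.Set.empty

theorem pvA_len (L R : List Int) : getLenOfPossibleResults L R = PySem.Set.len (pvASet L R) := rfl

theorem pvB_len (L R : List Int) : getLenOfPossibleResults_alt L R = PySem.Set.len (pvBSet L R) := rfl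

-- membership in a fold of set-updating steps, characterised level by level
theorem pvMemFoldlChar {α : Type} {g : PySem.Set Int → α → PySem.Set Int} {P : α → Int → Prop}
    (xs : List α)
    (h : ∀ s x, x ∈ xs → ∀ v, v ∈ g s x ↔ v ∈ s ∨ P x v) :
    ∀ (s : PySem.Set Int) (v : Int), v ∈ xs.foldl g s ↔ v ∈ s ∨ ∃ x ∈ xs, P x v := by
  induction xs with
  | nil => simp
  | cons a t ih =>
    intro s v
    rw [List.foldl_cons, ih (fun s x hx => h s x (List.mem_cons_of_mem a hx)),
        h s a (List.mem_cons_self)]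
    simp only [List.mem_cons]
    constructor
    · rintro ((hv | hv) | ⟨x, hx, hP⟩)
      · exact Or.inl hv
      · exact Or.inr ⟨a, Or.inl rfl, hv⟩
      · exact Or.inr ⟨x, Or.inr hx, hP⟩
    · rintro (hv | ⟨x, (rfl | hx), hP⟩)
      · exact Or.inl (Or.inl hv)
      · exact Or.inl (Or.inr hP)
      · exact Or.inr ⟨x, hx, hP⟩

theorem pvNodupFoldl {α : Type} {g : PySem.Set Int → α → PySem.Set Int}
    (h : ∀ s x, List.Nodup s → List.Nodup (g s x)) :
    ∀ (xs : List α) (s : PySem.Set Int), List.Nodup s → List.Nodup (xs.foldl g s) := by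
  intro xs
  induction xs with
  | nil => intro s hs; simpa using hs
  | cons a t ih => intro s hs; rw [List.foldl_cons]; exact ih _ (h s a hs)

theorem pvIndex?_of_mem (xs : List Int) (b : Int) (hb : b ∈ xs) :
    PySem.List.index? xs b = some (xs.idxOf b) := by
  rw [PySem.List.index?_eq_idxOf?]
  simp only [List.idxOf?_eq_some_iff]
  refine ⟨List.idxOf_lt_length_of_mem hb, List.getElem_idxOf _, fun j hj hx => ?_⟩
  have := List.not_of_lt_findIdx (p := (· == b)) (xs := xs) (by simpa [List.idxOf] using hj)
  simp only [beq_eq_false_iff_ne, ne_eq] at this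
  exact this hx

theorem pvRemoveBucket_eq_erase (xs : List Int) (b : Int) (hb : b ∈ xs) :
    pvRemoveBucket xs b = xs.erase b := by
  have h1 := pvIndex?_of_mem xs b hb
  have hlt := List.idxOf_lt_length_of_mem hb
  have h2 := PySem.List.pop?_natCast (xs := xs) (h := hlt)
  have h1' : List.idxOf? b xs = some (List.idxOf b xs) := by
    rw [← PySem.List.index?_eq_idxOf?]; exact h1
  rw [List.erase_eq_eraseIdx_of_idxOf (i := List.idxOf b xs) rfl]
  simp [pvRemoveBucket, h1', h2]

theorem pvExistsOtherCongr {X : List Int} {p p' : Nat} (hp : p < X.length) (hp' : p' < X.length)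
    (he : X[p] = X[p']) (y : Int) :
    (∃ q, ∃ hq : q < X.length, q ≠ p ∧ X[q] = y) ↔ (∃ q, ∃ hq : q < X.length, q ≠ p' ∧ X[q] = y) := by
  constructor
  · rintro ⟨q, hq, hqp, hqy⟩
    by_cases hq' : q = p'
    · subst hq'; exact ⟨p, hp, fun e => hqp e.symm, he ▸ hqy⟩
    · exact ⟨q, hq, hq', hqy⟩
  · rintro ⟨q, hq, hqp, hqy⟩
    by_cases hq' : q = p
    · subst hq'; exact ⟨p', hp', fun e => hqp e.symm, he ▸ hqy⟩
    · exact ⟨q, hq, hq', hqy⟩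

theorem pvMemEraseGetElem (X : List Int) (p : Nat) (hp : p < X.length) (y : Int) :
    y ∈ X.erase X[p] ↔ ∃ q, ∃ hq : q < X.length, q ≠ p ∧ X[q] = y := by
  have hmem : X[p] ∈ X := List.getElem_mem hp
  have hi0 : X.idxOf X[p] < X.length := List.idxOf_lt_length_of_mem hmem
  rw [List.erase_eq_eraseIdx_of_idxOf rfl, List.mem_eraseIdx_iff_getElem]
  exact pvExistsOtherCongr hi0 hp (List.getElem_idxOf hi0) y

theorem pvMemAdd (s : PySem.Set Int) (x v : Int) : v ∈ PySem.Set.add s x ↔ v ∈ s ∨ v = x :=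
  PySem.Set.mem_add s x v

theorem pvMemASet (L R : List Int) (v : Int) :
    v ∈ pvASet L R ↔
      ∃ i ∈ L, ∃ j ∈ R ++ [i], ∃ k ∈ (L.erase i) ++ [j],
        ∃ l ∈ ((R ++ [i]).erase j) ++ [k], v = 1000 + i - j + k - l := by
  unfold pvASet pvAddBucket
  have hchar : ∀ s i, i ∈ L → ∀ v,
      v ∈ ((R ++ [i]).foldl (fun s j =>
            ((pvRemoveBucket L i ++ [j])).foldl (fun s k =>
              ((pvRemoveBucket (R ++ [i]) j ++ [k])).foldl (fun s l =>
                PySem.Set.add s (1000 + i - j + k - l)) s) s) s) ↔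
        v ∈ s ∨ ∃ j ∈ R ++ [i], ∃ k ∈ (L.erase i) ++ [j],
          ∃ l ∈ ((R ++ [i]).erase j) ++ [k], v = 1000 + i - j + k - l := by
    intro s i hi v
    rw [pvRemoveBucket_eq_erase L i hi]
    have hJ : ∀ s j, j ∈ R ++ [i] → ∀ v,
        v ∈ (((L.erase i) ++ [j]).foldl (fun s k =>
              ((pvRemoveBucket (R ++ [i]) j ++ [k])).foldl (fun s l =>
                PySem.Set.add s (1000 + i - j + k - l)) s) s) ↔
          v ∈ s ∨ ∃ k ∈ (L.erase i) ++ [j],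
            ∃ l ∈ ((R ++ [i]).erase j) ++ [k], v = 1000 + i - j + k - l := by
      intro s j hj v
      rw [pvRemoveBucket_eq_erase (R ++ [i]) j hj]
      exact pvMemFoldlChar ((L.erase i) ++ [j]) (fun s k _ v =>
        pvMemFoldlChar (((R ++ [i]).erase j) ++ [k]) (fun s l _ v =>
          pvMemAdd s (1000 + i - j + k - l) v) s v) s v
    exact pvMemFoldlChar (R ++ [i]) hJ s v
  rw [pvMemFoldlChar L hchar]
  simp [PySem.Set.empty]

theorem pvKeyBSet (L R : List Int) (v : Int) :
    v ∈ pvBSet L R ↔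
      ∃ i1 ∈ PySem.List.pyRange 0 (L.length : Int) 1,
        ∃ j1 ∈ PySem.List.pyRange 0 ((R.length : Int) + 1) 1,
          ∃ k1 ∈ PySem.List.pyRange 0 ((L.length : Int) + 1) 1, k1 ≠ i1 ∧
            ∃ l1 ∈ PySem.List.pyRange 0 ((R.length : Int) + 2) 1,
              (l1 ≠ j1 ∧ v = pvE L R i1 j1 k1 l1) := by
  unfold pvBSet
  have hchar : ∀ s i1, i1 ∈ PySem.List.pyRange 0 (L.length : Int) 1 → ∀ v,
      v ∈ ((PySem.List.pyRange 0 ((R.length : Int) + 1) 1).foldl (fun s j1 =>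
            (PySem.List.pyRange 0 ((L.length : Int) + 1) 1).foldl (fun s k1 =>
              if k1 = i1 then s else
              (PySem.List.pyRange 0 ((R.length : Int) + 2) 1).foldl (fun s l1 =>
                if l1 = j1 then s else
                PySem.Set.add s (pvE L R i1 j1 k1 l1)) s) s) s) ↔
        v ∈ s ∨ ∃ j1 ∈ PySem.List.pyRange 0 ((R.length : Int) + 1) 1,
          ∃ k1 ∈ PySem.List.pyRange 0 ((L.length : Int) + 1) 1, k1 ≠ i1 ∧
            ∃ l1 ∈ PySem.List.pyRange 0 ((R.length : Int) + 2) 1,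
              (l1 ≠ j1 ∧ v = pvE L R i1 j1 k1 l1) := by
    intro s i1 _ v
    have hJ : ∀ s j1, j1 ∈ PySem.List.pyRange 0 ((R.length : Int) + 1) 1 → ∀ v,
        v ∈ ((PySem.List.pyRange 0 ((L.length : Int) + 1) 1).foldl (fun s k1 =>
              if k1 = i1 then s else
              (PySem.List.pyRange 0 ((R.length : Int) + 2) 1).foldl (fun s l1 =>
                if l1 = j1 then s else
                PySem.Set.add s (pvE L R i1 j1 k1 l1)) s) s) ↔
          v ∈ s ∨ ∃ k1 ∈ PySem.List.pyRange 0 ((L.length : Int) + 1) 1, k1 ≠ i1 ∧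
            ∃ l1 ∈ PySem.List.pyRange 0 ((R.length : Int) + 2) 1,
              (l1 ≠ j1 ∧ v = pvE L R i1 j1 k1 l1) := by
      intro s j1 _ v
      have hK : ∀ s k1, k1 ∈ PySem.List.pyRange 0 ((L.length : Int) + 1) 1 → ∀ v,
          v ∈ (if k1 = i1 then s else
               (PySem.List.pyRange 0 ((R.length : Int) + 2) 1).foldl (fun s l1 =>
                 if l1 = j1 then s else
                 PySem.Set.add s (pvE L R i1 j1 k1 l1)) s) ↔
            v ∈ s ∨ (k1 ≠ i1 ∧
              ∃ l1 ∈ PySem.List.pyRange 0 ((R.length : Int) + 2) 1,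
                (l1 ≠ j1 ∧ v = pvE L R i1 j1 k1 l1)) := by
        intro s k1 _ v
        by_cases hk : k1 = i1
        · simp [hk]
        · rw [if_neg hk]
          have hL4 : ∀ s l1, l1 ∈ PySem.List.pyRange 0 ((R.length : Int) + 2) 1 → ∀ v,
              v ∈ (if l1 = j1 then s else PySem.Set.add s (pvE L R i1 j1 k1 l1)) ↔
                v ∈ s ∨ (l1 ≠ j1 ∧ v = pvE L R i1 j1 k1 l1) := by
            intro s l1 _ v
            by_cases hl : l1 = j1
            · simp [hl]
            · rw [if_neg hl, pvMemAdd]; simp [hl]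
          rw [pvMemFoldlChar _ hL4 s v]
          simp [hk]
      exact pvMemFoldlChar _ hK s v
    exact pvMemFoldlChar _ hJ s v
  rw [pvMemFoldlChar _ hchar]
  simp [PySem.Set.empty]

theorem pvMemBSet (L R : List Int) (v : Int) :
    v ∈ pvBSet L R ↔
      ∃ i ∈ L, ∃ j ∈ R ++ [i], ∃ k ∈ (L.erase i) ++ [j],
        ∃ l ∈ ((R ++ [i]).erase j) ++ [k], v = 1000 + i - j + k - l := by
  rw [pvKeyBSet]
  constructor
  · rintro ⟨i1, hi1, j1, hj1, k1, hk1, hki, l1, hl1, hlj, rfl⟩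
    rw [PySem.List.mem_pyRange_one] at hi1 hj1 hk1 hl1
    obtain ⟨p, rfl⟩ : ∃ p : Nat, i1 = (p : Int) := ⟨i1.toNat, (Int.toNat_of_nonneg hi1.1).symm⟩
    obtain ⟨q, rfl⟩ : ∃ q : Nat, j1 = (q : Int) := ⟨j1.toNat, (Int.toNat_of_nonneg hj1.1).symm⟩
    have hp : p < L.length := by exact_mod_cast hi1.2
    have hq : q < R.length + 1 := by exact_mod_cast hj1.2
    have hie : PySem.List.pyGetD L (p : Int) 0 = L[p] := by
      rw [PySem.List.pyGetD_natCast, List.getD_eq_getElem L 0 hp]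
    set X : List Int := R ++ [L[p]] with hX
    have hqX : q < X.length := by simp [hX]; omega
    have hje : (if (q : Int) < (R.length : Int) then PySem.List.pyGetD R (q : Int) 0
                else PySem.List.pyGetD L (p : Int) 0) = X[q] := by
      by_cases hqr : q < R.length
      · rw [if_pos (by exact_mod_cast hqr), PySem.List.pyGetD_natCast,
            List.getD_eq_getElem R 0 hqr]
        exact (List.getElem_append_left hqr).symm
      · have hqe : q = R.length := by omega
        rw [if_neg (by exact_mod_cast hqr), hie]
        subst hqe
        exact (List.getElem_concat_length rfl hqX).symm
    -- the k value
    have hkmem : ∃ kv, (if k1 < (L.length : Int) then PySem.List.pyGetD L k1 0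
          else if (q : Int) < (R.length : Int) then PySem.List.pyGetD R (q : Int) 0
          else PySem.List.pyGetD L (p : Int) 0) = kv ∧ kv ∈ (L.erase L[p]) ++ [X[q]] := by
      by_cases hkl : k1 < (L.length : Int)
      · obtain ⟨r, rfl⟩ : ∃ r : Nat, k1 = (r : Int) := ⟨k1.toNat, (Int.toNat_of_nonneg hk1.1).symm⟩
        have hr : r < L.length := by exact_mod_cast hkl
        refine ⟨L[r], ?_, ?_⟩
        · rw [if_pos hkl, PySem.List.pyGetD_natCast, List.getD_eq_getElem L 0 hr]
        · refine List.mem_append_left _ ?_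
          rw [pvMemEraseGetElem L p hp]
          exact ⟨r, hr, fun e => hki (by exact_mod_cast congrArg (Nat.cast : Nat → Int) e), rfl⟩
      · refine ⟨X[q], ?_, by simp⟩
        rw [if_neg hkl]
        exact hje
    obtain ⟨kv, hke, hkvmem⟩ := hkmem
    -- the l value
    have hlmem : ∃ lv, (if l1 < (R.length : Int) then PySem.List.pyGetD R l1 0
          else if l1 = (R.length : Int) then PySem.List.pyGetD L (p : Int) 0
          else if k1 < (L.length : Int) then PySem.List.pyGetD L k1 0
          else if (q : Int) < (R.length : Int) then PySem.List.pyGetD R (q : Int) 0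
          else PySem.List.pyGetD L (p : Int) 0) = lv ∧ lv ∈ (X.erase X[q]) ++ [kv] := by
      by_cases hlr : l1 < (R.length : Int)
      · obtain ⟨r, rfl⟩ : ∃ r : Nat, l1 = (r : Int) := ⟨l1.toNat, (Int.toNat_of_nonneg hl1.1).symm⟩
        have hr : r < R.length := by exact_mod_cast hlr
        have hrX : r < X.length := by simp [hX]; omega
        refine ⟨X[r], ?_, ?_⟩
        · rw [if_pos hlr, PySem.List.pyGetD_natCast, List.getD_eq_getElem R 0 hr]
          exact (List.getElem_append_left hr).symm
        · refine List.mem_append_left _ ?_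
          rw [pvMemEraseGetElem X q hqX]
          exact ⟨r, hrX, by intro e; exact hlj (by exact_mod_cast congrArg Nat.cast e), rfl⟩
      · by_cases hle : l1 = (R.length : Int)
        · have hqne : q ≠ R.length := by intro e; apply hlj; rw [hle, e]
          have hRX : R.length < X.length := by simp [hX]
          refine ⟨X[R.length], ?_, ?_⟩
          · rw [if_neg hlr, if_pos hle, hie]
            exact (List.getElem_concat_length rfl hRX).symm
          · refine List.mem_append_left _ ?_
            rw [pvMemEraseGetElem X q hqX]
            exact ⟨R.length, hRX, fun e => hqne e.symm, rfl⟩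
        · refine ⟨kv, ?_, by simp⟩
          rw [if_neg hlr, if_neg hle]
          exact hke
    obtain ⟨lv, hle, hlvmem⟩ := hlmem
    refine ⟨L[p], List.getElem_mem hp, X[q], List.getElem_mem hqX, kv, hkvmem, lv, hlvmem, ?_⟩
    unfold pvE
    rw [hle, hke, hje, hie]
  · rintro ⟨i, hi, j, hj, k, hk, l, hl, rfl⟩
    obtain ⟨p, hp, rfl⟩ := List.mem_iff_getElem.mp hi
    set X : List Int := R ++ [L[p]] with hX
    obtain ⟨q, hqX, hXq⟩ := List.mem_iff_getElem.mp (show j ∈ X from hj)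
    have hq : q < R.length + 1 := by simpa [hX] using hqX
    have hie : PySem.List.pyGetD L (p : Int) 0 = L[p] := by
      rw [PySem.List.pyGetD_natCast, List.getD_eq_getElem L 0 hp]
    have hje : (if (q : Int) < (R.length : Int) then PySem.List.pyGetD R (q : Int) 0
                else PySem.List.pyGetD L (p : Int) 0) = j := by
      rw [← hXq]
      by_cases hqr : q < R.length
      · rw [if_pos (by exact_mod_cast hqr), PySem.List.pyGetD_natCast,
            List.getD_eq_getElem R 0 hqr]
        exact (List.getElem_append_left hqr).symm
      · have hqe : q = R.length := by omega
        rw [if_neg (by exact_mod_cast hqr), hie]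
        subst hqe
        exact (List.getElem_concat_length rfl hqX).symm
    rw [← hXq] at hl
    obtain ⟨k1, hk1b, hki, hke⟩ : ∃ k1 : Int, (0 ≤ k1 ∧ k1 < (L.length : Int) + 1) ∧
        k1 ≠ (p : Int) ∧
        ((if k1 < (L.length : Int) then PySem.List.pyGetD L k1 0
          else if (q : Int) < (R.length : Int) then PySem.List.pyGetD R (q : Int) 0
          else PySem.List.pyGetD L (p : Int) 0) = k) := by
      rcases List.mem_append.mp hk with hkE | hkS
      · rw [pvMemEraseGetElem L p hp] at hkE
        obtain ⟨r, hr, hrp, hLr⟩ := hkE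
        refine ⟨(r : Int), ⟨by omega, by exact_mod_cast Int.ofNat_lt.mpr (by omega)⟩,
          by exact_mod_cast fun e => hrp (by exact_mod_cast e), ?_⟩
        rw [if_pos (by exact_mod_cast hr), PySem.List.pyGetD_natCast,
            List.getD_eq_getElem L 0 hr]
        exact hLr
      · have hkj : k = j := List.mem_singleton.mp hkS
        refine ⟨(L.length : Int), ⟨by omega, by omega⟩, by exact_mod_cast by omega, ?_⟩
        rw [if_neg (lt_irrefl _)]
        exact hje.trans hkj.symm
    obtain ⟨l1, hl1b, hlj, hle⟩ : ∃ l1 : Int, (0 ≤ l1 ∧ l1 < (R.length : Int) + 2) ∧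
        l1 ≠ (q : Int) ∧
        ((if l1 < (R.length : Int) then PySem.List.pyGetD R l1 0
          else if l1 = (R.length : Int) then PySem.List.pyGetD L (p : Int) 0
          else if k1 < (L.length : Int) then PySem.List.pyGetD L k1 0
          else if (q : Int) < (R.length : Int) then PySem.List.pyGetD R (q : Int) 0
          else PySem.List.pyGetD L (p : Int) 0) = l) := by
      rcases List.mem_append.mp hl with hlE | hlS
      · rw [pvMemEraseGetElem X q hqX] at hlE
        obtain ⟨r, hrX, hrq, hXr⟩ := hlE
        by_cases hrR : r < R.length
        · refine ⟨(r : Int), ⟨by omega, by exact_mod_cast Int.ofNat_lt.mpr (by omega)⟩,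
            by exact_mod_cast fun e => hrq (by exact_mod_cast e), ?_⟩
          rw [if_pos (by exact_mod_cast hrR), PySem.List.pyGetD_natCast,
              List.getD_eq_getElem R 0 hrR]
          rw [← hXr]
          exact (List.getElem_append_left hrR).symm
        · have hre : r = R.length := by
            have := hrX; rw [hX] at this; simp at this; omega
          refine ⟨(R.length : Int), ⟨by omega, by omega⟩,
            by exact_mod_cast fun e => hrq (by omega), ?_⟩
          rw [if_neg (lt_irrefl _), if_pos rfl, hie]
          rw [← hXr]
          subst hre
          exact (List.getElem_concat_length rfl hrX).symm
      · have hlk : l = k := List.mem_singleton.mp hlS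
        refine ⟨(R.length : Int) + 1, ⟨by omega, by omega⟩, by exact_mod_cast by omega, ?_⟩
        rw [if_neg (by omega), if_neg (by omega)]
        exact hke.trans hlk.symm
    refine ⟨(p : Int), ?_, (q : Int), ?_, k1, ?_, hki, l1, ?_, hlj, ?_⟩
    · rw [PySem.List.mem_pyRange_one]; omega
    · rw [PySem.List.mem_pyRange_one]; omega
    · rw [PySem.List.mem_pyRange_one]; exact hk1b
    · rw [PySem.List.mem_pyRange_one]; exact hl1b
    · unfold pvE
      rw [hle, hke, hje, hie]

theorem pvNodupASet (L R : List Int) : (pvASet L R).Nodup := by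
  unfold pvASet
  refine pvNodupFoldl (fun s i hs => ?_) L PySem.Set.empty (by simp [PySem.Set.empty])
  refine pvNodupFoldl (fun s j hs => ?_) _ s hs
  refine pvNodupFoldl (fun s k hs => ?_) _ s hs
  refine pvNodupFoldl (fun s l hs => ?_) _ s hs
  exact PySem.Set.nodup_add s _ hs

theorem pvNodupBSet (L R : List Int) : (pvBSet L R).Nodup := by
  unfold pvBSet
  refine pvNodupFoldl (fun s i1 hs => ?_) _ PySem.Set.empty (by simp [PySem.Set.empty])
  refine pvNodupFoldl (fun s j1 hs => ?_) _ s hs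
  refine pvNodupFoldl (fun s k1 hs => ?_) _ s hs
  split
  · exact hs
  refine pvNodupFoldl (fun s l1 hs => ?_) _ s hs
  split
  · exact hs
  exact PySem.Set.nodup_add s _ hs

-- ===== VERDICT (by name: the statement is the Claim_ definition above) =====
theorem getLenOfPossibleResults_spec : Claim_equal_getLenOfPossibleResults := by
  intro L R _
  unfold Spec_getLenOfPossibleResults
  rw [pvA_len, pvB_len]
  have hperm : (pvASet L R).Perm (pvBSet L R) :=
    (List.perm_ext_iff_of_nodup (pvNodupASet L R) (pvNodupBSet L R)).mpr
      (fun x => (pvMemASet L R x).trans (pvMemBSet L R x).symm)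
  unfold PySem.Set.len
  exact congrArg _ hperm.length_eq
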